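-- pv_equiv track=rewrite | github.com/tmu-nlp/100knock2017 | Shi-ma/chapter01/knock05.py | ngram_w
-- ===== SOURCE A (Python) =====
-- def ngram_w(n, txt):
--     words_w = txt.replace(',', ' ').replace('.', ' ').split()
--     txt_ngw = []
--
--     if len(words_w) >= n:
--         for i in range(len(words_w)-n+1):
--             ngw = []
--             for j in range(i, i+n):
--                 ngw.append(words_w[j])
--             txt_ngw.append(ngw)
--         return txt_ngw
--     else:
--         return words_w
-- ===== SOURCE B (Python) =====
-- def ngram_w(n, txt):
--     words_w = txt.replace(',', ' ').replace('.', ' ').split()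
--     if len(words_w) >= n:
--         # grow all windows at once, column by column, zipping with shifted suffixes
--         ngrams = [[] for _ in range(len(words_w) - n + 1)]
--         for off in range(n):
--             ngrams = [ng + [w] for ng, w in zip(ngrams, words_w[off:])]
--         return ngrams
--     else:
--         return words_w
-- ===== Notes on version B (the rewrite author's own statement) =====
-- stated objective: alternative
-- what changed: A slides an index window with nested loops, appending word by word into each n-gram; B grows all n-gram windows simultaneously, column by column, zipping the window list with the shifted suffix words_w[off:] for each offset.
-- outside the precondition, e.g. on ngram_w(3, 'a b'): A returns ['a', 'b'], B returns ['a', 'b']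
import Mathlib
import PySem

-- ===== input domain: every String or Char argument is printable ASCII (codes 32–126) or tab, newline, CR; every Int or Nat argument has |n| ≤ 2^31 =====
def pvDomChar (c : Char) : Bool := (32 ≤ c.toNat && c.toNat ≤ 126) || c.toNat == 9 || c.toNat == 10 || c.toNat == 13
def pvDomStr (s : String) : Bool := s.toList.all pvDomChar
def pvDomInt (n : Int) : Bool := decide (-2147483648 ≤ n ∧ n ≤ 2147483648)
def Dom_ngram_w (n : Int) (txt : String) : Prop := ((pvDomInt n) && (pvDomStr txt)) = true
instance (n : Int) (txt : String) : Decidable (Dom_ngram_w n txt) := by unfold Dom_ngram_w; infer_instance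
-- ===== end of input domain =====

-- B grows all n-gram windows at once, column by column, zipping with shifted suffixes, instead of
-- A's rowwise nested index loops; objective: alternative (same cost, transposed traversal).

-- ===== PORT A =====
def ngram_w (n : Int) (txt : String) : List (List String) :=
  let words_w := PySem.Str.split₀ (PySem.Str.replace (PySem.Str.replace txt "," " ") "." " ")
  if (words_w.length : Int) ≥ n then
    (PySem.List.pyRange 0 ((words_w.length : Int) - n + 1) 1).foldl
      (fun txt_ngw i =>
        txt_ngw ++ [(PySem.List.pyRange i (i + n) 1).foldl
          (fun ngw j => ngw ++ [PySem.List.pyGetD words_w j ""]) []])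
      []
  else
    -- Python returns the bare word list here (a list[str], not list[list[str]]); when it is
    -- nonempty no value of the declared type exists, so Pre_ excludes that case; each word is
    -- wrapped to typecheck.
    words_w.map (fun w => [w])

-- ===== PORT B =====
def ngram_w_alt (n : Int) (txt : String) : List (List String) :=
  let words_w := PySem.Str.split₀ (PySem.Str.replace (PySem.Str.replace txt "," " ") "." " ")
  if (words_w.length : Int) ≥ n then
    -- ngrams = [[] for _ in range(len-n+1)]; for off in range(n): zip with words_w[off:]
    (PySem.List.pyRange 0 n 1).foldl
      (fun ngrams off =>
        List.zipWith (fun ng w => ng ++ [w]) ngrams (PySem.List.slice words_w (some off) none))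
      (List.replicate ((words_w.length : Int) - n + 1).toNat [])
  else
    -- same untypeable bare-word-list branch as in A's port; nonempty case excluded by Pre_.
    words_w.map (fun w => [w])

-- ===== PRECONDITION & SPEC =====
-- Pre_ excludes only inputs with a NONEMPTY word list shorter than n, where the Python returns the
-- bare word list — a list[str], not a value of the declared type List (List String). (With no words
-- at all that bare list is [], a valid value of the declared type, so those inputs stay inside.)
def Pre_ngram_w (n : Int) (txt : String) : Prop :=
  n ≤ ((PySem.Str.split₀ (PySem.Str.replace (PySem.Str.replace txt "," " ") "." " ")).length : Int) ∨
  (PySem.Str.split₀ (PySem.Str.replace (PySem.Str.replace txt "," " ") "." " ")).length = 0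
instance (n : Int) (txt : String) : Decidable (Pre_ngram_w n txt) := by unfold Pre_ngram_w; infer_instance
def pvWitness_ngram_w : Int × String := (2, "a, b c.")

def Spec_ngram_w (n : Int) (txt : String) (out : List (List String)) : Prop := out = ngram_w_alt n txt
instance (n : Int) (txt : String) (out : List (List String)) : Decidable (Spec_ngram_w n txt out) := by unfold Spec_ngram_w; infer_instance

-- ===== CLAIM (what is proved, stated in full; the proofs are below) =====
def Claim_equal_ngram_w : Prop := ∀ (n : Int) (txt : String), Dom_ngram_w n txt → Pre_ngram_w n txt → Spec_ngram_w n txt (ngram_w n txt)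

-- ===== LEMMAS AND PROOFS =====

-- A's nested loops compute the rowwise double map over indices.
lemma A_loop_eq (n : Int) (words : List String) :
    (PySem.List.pyRange 0 ((words.length : Int) - n + 1) 1).foldl
      (fun txt_ngw i =>
        txt_ngw ++ [(PySem.List.pyRange i (i + n) 1).foldl
          (fun ngw j => ngw ++ [PySem.List.pyGetD words j ""]) []])
      [] =
    (List.range ((words.length : Int) - n + 1).toNat).map
      (fun k => (List.range n.toNat).map (fun t => words.getD (k + t) "")) := by
  rw [PySem.List.foldl_append_singleton_eq_map, List.nil_append,
    PySem.List.pyRange_one,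
    show ((words.length : Int) - n + 1 - 0).toNat = ((words.length : Int) - n + 1).toNat from by omega,
    List.map_map]
  apply List.map_congr_left
  intro k _
  simp only [Function.comp, zero_add]
  rw [PySem.List.foldl_append_singleton_eq_map, List.nil_append,
    PySem.List.pyRange_one,
    show ((k : Int) + n - (k : Int)).toNat = n.toNat from by omega,
    List.map_map]
  apply List.map_congr_left
  intro t _
  simp only [Function.comp]
  rw [show ((k : Int) + (t : Nat)) = (((k + t : Nat) : Int)) from by push_cast; ring,
    PySem.List.pyGetD_natCast]

-- one column step of B: zip an indexed family with the suffix words[t:]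
lemma zip_step_eq (words : List String) (m t : Nat) (h : t + m ≤ words.length)
    (g : Nat → List String) :
    List.zipWith (fun ng w => ng ++ [w]) ((List.range m).map g) (words.drop t) =
    (List.range m).map (fun k => g k ++ [words.getD (k + t) ""]) := by
  apply List.ext_getElem
  · simp only [List.length_zipWith, List.length_map, List.length_range, List.length_drop]
    omega
  · intro i h1 h2
    have hi : i < m := by simpa using h2
    have hiL : t + i < words.length := by omega
    simp only [List.getElem_zipWith, List.getElem_map, List.getElem_range, List.getElem_drop]
    rw [List.getD_eq_getElem words "" (by omega : i + t < words.length)]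
    simp [Nat.add_comm t i]

-- B's outer loop, peeled column by column from the right
lemma B_loop_eq (n : Int) (words : List String) (h1 : 1 ≤ n) (h2 : n ≤ (words.length : Int)) :
    ∀ (t : Nat), t ≤ n.toNat →
    (PySem.List.pyRange 0 (t : Int) 1).foldl
      (fun ngrams off =>
        List.zipWith (fun ng w => ng ++ [w]) ngrams (PySem.List.slice words (some off) none))
      (List.replicate ((words.length : Int) - n + 1).toNat []) =
    (List.range ((words.length : Int) - n + 1).toNat).map
      (fun k => (List.range t).map (fun j => words.getD (k + j) "")) := by
  intro t
  induction t with
  | zero =>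
    intro _
    rw [show ((0 : Nat) : Int) = 0 from rfl, PySem.List.pyRange_one_eq_nil (le_refl 0)]
    simp [List.map_const']
  | succ t ih =>
    intro ht
    have htn : t ≤ n.toNat := by omega
    rw [show ((t + 1 : Nat) : Int) = (t : Int) + 1 from by push_cast; ring,
      PySem.List.pyRange_one_succ_right (by positivity), List.foldl_append, ih htn]
    simp only [List.foldl_cons, List.foldl_nil]
    rw [PySem.List.slice_from_natCast,
      zip_step_eq words _ t (by omega)]
    apply List.map_congr_left
    intro k _
    rw [List.range_succ, List.map_append, List.map_cons, List.map_nil]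

-- ===== VERDICT (by name: the statement is the Claim_ definition above) =====
set_option maxHeartbeats 1000000 in
theorem ngram_w_spec : Claim_equal_ngram_w := by
  intro n txt _ hpre
  unfold Pre_ngram_w at hpre
  simp only [Spec_ngram_w, ngram_w, ngram_w_alt]
  set words := PySem.Str.split₀ (PySem.Str.replace (PySem.Str.replace txt "," " ") "." " ") with hw
  by_cases hc : (words.length : Int) ≥ n
  · rw [if_pos hc, if_pos hc, A_loop_eq]
    by_cases hn : 1 ≤ n
    · have hB := B_loop_eq n words hn hc n.toNat (le_refl _)
      rw [show ((n.toNat : Nat) : Int) = n from by omega] at hB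
      rw [hB]
    · -- n ≤ 0: no columns on either side, both are lists of empty windows
      rw [PySem.List.pyRange_one_eq_nil (by omega : n ≤ 0), List.foldl_nil,
        show n.toNat = 0 from by omega]
      simp only [List.range_zero, List.map_nil, List.map_const', List.length_range]
  · -- fewer words than n: Pre_ forces the word list to be empty, both else-branches are []
    rw [if_neg hc, if_neg hc]
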